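-- pv_equiv track=rewrite | github.com/nhimzu123/Big-O-Blue | 08_27_21_Stack_&_Queue/ex8.py | check
-- ===== SOURCE A (Python) =====
-- def check(s):
--     cost = 0
--     stack = []
--
--     for i in range(len(s)):
--         if s[i] == "<":
--             stack.append(s[i])
--         elif not stack:
--             break
--         else:
--             stack.pop()
--             cost = i + 1 if not stack else cost
--
--     return cost
-- ===== SOURCE B (Python) =====
-- def check(s):
--     # balance table: '<' -> +1, anything else -> -1 (mirrors A's elif)
--     bal = []
--     b = 0
--     for ch in s:
--         b += 1 if ch == "<" else -1
--         bal.append(b)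
--     # truncation point: first index where the running balance goes negative
--     cut = len(bal)
--     for i in range(len(bal)):
--         if bal[i] < 0:
--             cut = i
--             break
--     # last zero-balance position strictly before the truncation point
--     ans = 0
--     for i in range(cut):
--         if bal[i] == 0:
--             ans = i + 1
--     return ans
-- ===== Notes on version B (the rewrite author's own statement) =====
-- stated objective: alternative
-- what changed: Replaces A's single stack-maintaining early-break pass with building a running-balance prefix table, then locating the first negative-balance index (the truncation point) and finally taking the last zero-balance position before it.
import Mathlib
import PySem

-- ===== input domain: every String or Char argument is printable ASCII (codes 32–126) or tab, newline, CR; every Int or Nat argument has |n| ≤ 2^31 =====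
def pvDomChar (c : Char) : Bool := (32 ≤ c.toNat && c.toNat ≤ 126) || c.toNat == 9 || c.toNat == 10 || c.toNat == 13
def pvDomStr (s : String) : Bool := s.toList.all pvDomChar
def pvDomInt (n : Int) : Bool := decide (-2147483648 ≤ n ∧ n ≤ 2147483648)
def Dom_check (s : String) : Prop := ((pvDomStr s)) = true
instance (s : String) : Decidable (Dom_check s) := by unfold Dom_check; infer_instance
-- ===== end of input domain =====

-- B replaces A's single stack pass with a balance-table, truncation-point, last-zero scan; objective: alternative decomposition.

-- ===== PORT A =====
-- A's for-loop over s with stack and early break, as structural recursion with index i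
def checkLoop : List Char → Int → Int → List Char → Int
  | [], _, cost, _ => cost
  | c :: rest, i, cost, stack =>
    if c = '<' then checkLoop rest (i + 1) cost (c :: stack)
    else match stack with
      | [] => cost                                   -- break
      | _ :: tl => checkLoop rest (i + 1) (if tl.isEmpty then i + 1 else cost) tl

def check (s : String) : Int := checkLoop s.toList 0 0 []

-- ===== PORT B =====
-- running-balance prefix table
def balances : List Char → Int → List Int
  | [], _ => []
  | c :: r, b =>
    let b' := b + (if c = '<' then 1 else -1)
    b' :: balances r b'

-- first index with negative balance (default: past the end)
def cutIdx : List Int → Int → Int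
  | [], i => i
  | v :: r, i => if v < 0 then i else cutIdx r (i + 1)

-- last index+1 with zero balance among indices < cut
def lastZero : List Int → Int → Int → Int → Int
  | [], _, _, ans => ans
  | v :: r, i, cut, ans =>
    if i < cut then lastZero r (i + 1) cut (if v = 0 then i + 1 else ans) else ans

def check_alt (s : String) : Int :=
  let bal := balances s.toList 0
  let cut := cutIdx bal 0
  lastZero bal 0 cut 0

-- ===== PRECONDITION & SPEC =====
def Spec_check (s : String) (out : Int) : Prop := out = check_alt s
instance (s : String) (out : Int) : Decidable (Spec_check s out) := by unfold Spec_check; infer_instance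

-- ===== CLAIM (what is proved, stated in full; the proofs are below) =====
def Claim_equal_check : Prop := ∀ (s : String), Dom_check s → Spec_check s (check s)

-- ===== LEMMAS AND PROOFS =====

-- common specification of both loops: running balance b, early stop on negative
def gspec : List Char → Int → Int → Int → Int
  | [], _, cost, _ => cost
  | c :: r, b, cost, i =>
    let b' := b + (if c = '<' then 1 else -1)
    if b' < 0 then cost else gspec r b' (if b' = 0 then i + 1 else cost) (i + 1)

theorem checkLoop_eq_gspec (cs : List Char) : ∀ (i cost : Int) (n : Nat),
    checkLoop cs i cost (List.replicate n '<') = gspec cs (n : Int) cost i := by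
  induction cs with
  | nil => intro i cost n; rfl
  | cons c r ih =>
    intro i cost n
    by_cases hc : c = '<'
    · have hnn := Int.natCast_nonneg n
      have h1 : ¬ ((n : Int) + 1 < 0) := by omega
      have h2 : ¬ ((n : Int) + 1 = 0) := by omega
      simp only [checkLoop, gspec, hc]
      have hrep : ('<' :: List.replicate n '<') = List.replicate (n + 1) '<' := by
        simp [List.replicate_succ]
      rw [hrep, ih]
      have hcast : ((n + 1 : Nat) : Int) = (n : Int) + 1 := by push_cast; ring
      simp [hcast, h1, h2]
    · cases n with
      | zero =>
        simp [checkLoop, gspec, hc]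
      | succ k =>
        simp only [checkLoop, gspec, hc, List.replicate_succ]
        rw [ih]
        have hb : (((k + 1 : Nat)) : Int) + (-1) = (k : Int) := by push_cast; ring
        have hk := Int.natCast_nonneg k
        have hneg : ¬ ((k : Int) < 0) := by omega
        have hz : ((k : Int) = 0) ↔ (k = 0) := by exact_mod_cast Iff.rfl
        simp only [hb, hneg, if_false, hz, List.isEmpty_iff,
          List.replicate_eq_nil_iff]

theorem cutIdx_ge : ∀ (bs : List Int) (i : Int), i ≤ cutIdx bs i := by
  intro bs
  induction bs with
  | nil => intro i; simp [cutIdx]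
  | cons v r ih =>
    intro i
    simp only [cutIdx]
    split
    · omega
    · have := ih (i + 1); omega

theorem gspec_eq_lastZero (cs : List Char) : ∀ (b cost i : Int),
    gspec cs b cost i = lastZero (balances cs b) i (cutIdx (balances cs b) i) cost := by
  induction cs with
  | nil => intro b cost i; rfl
  | cons c r ih =>
    intro b cost i
    simp only [gspec, balances, cutIdx]
    by_cases hneg : b + (if c = '<' then 1 else -1) < 0
    · simp [hneg, lastZero]
    · have hcut : i < cutIdx (balances r (b + (if c = '<' then 1 else -1))) (i + 1) := by
        have := cutIdx_ge (balances r (b + (if c = '<' then 1 else -1))) (i + 1); omega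
      simp only [if_neg hneg, lastZero, if_pos hcut]
      exact ih _ _ _

-- ===== VERDICT (by name: the statement is the Claim_ definition above) =====
theorem check_spec : Claim_equal_check := by
  intro s _
  show check s = check_alt s
  unfold check check_alt
  have h0 : checkLoop s.toList 0 0 [] = checkLoop s.toList 0 0 (List.replicate 0 '<') := rfl
  rw [h0, checkLoop_eq_gspec, gspec_eq_lastZero]
  norm_num
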